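-- pv_equiv track=rewrite | github.com/lys-hh/HEMS-RL | environment.py | _find_contiguous_segments
-- ===== SOURCE A (Python) =====
-- def _find_contiguous_segments(bool_list):
--     """Detect contiguous time periods where value is True"""
--     segments = []
--     start_idx = None
--     for i, value in enumerate(bool_list):
--         if value and start_idx is None:
--             start_idx = i
--         elif not value and start_idx is not None:
--             segments.append((start_idx, i - 1))
--             start_idx = None
--     if start_idx is not None:  # Handle last segment
--         segments.append((start_idx, len(bool_list) - 1))
--     return segments
-- ===== SOURCE B (Python) =====
-- from itertools import groupby
--
-- def _find_contiguous_segments(bool_list):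
--     """Detect contiguous time periods where value is True (run-grouping version)."""
--     segments = []
--     idx = 0
--     for key, group in groupby(bool_list, key=bool):
--         length = len(list(group))
--         if key:
--             segments.append((idx, idx + length - 1))
--         idx += length
--     return segments
-- ===== Notes on version B (the rewrite author's own statement) =====
-- stated objective: idiomatic
-- what changed: Replaced the start_idx state machine with itertools.groupby run-grouping: iterate consecutive equal runs, emit (idx, idx+len-1) for True runs, advance idx by each run length.
import Mathlib
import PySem

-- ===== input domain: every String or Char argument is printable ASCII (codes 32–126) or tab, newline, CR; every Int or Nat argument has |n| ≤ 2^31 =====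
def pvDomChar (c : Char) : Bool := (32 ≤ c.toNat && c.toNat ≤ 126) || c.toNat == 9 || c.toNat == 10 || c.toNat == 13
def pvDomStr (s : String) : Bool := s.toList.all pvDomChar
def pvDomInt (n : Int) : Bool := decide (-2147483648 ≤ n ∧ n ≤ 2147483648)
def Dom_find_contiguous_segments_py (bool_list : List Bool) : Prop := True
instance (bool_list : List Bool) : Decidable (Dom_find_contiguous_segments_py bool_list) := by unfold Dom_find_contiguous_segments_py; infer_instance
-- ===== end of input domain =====

-- B rewrites A's start_idx state machine as idiomatic itertools.groupby run-grouping (same O(n) cost).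
-- ===== PORT A =====
def find_contiguous_segments_py (bool_list : List Bool) : List (Int × Int) :=
  -- for i, value in enumerate(bool_list): the two-branch state machine over (segments, start_idx)
  let st := (PySem.List.enumerate bool_list 0).foldl
    (fun (st : List (Int × Int) × Option Int) (p : Int × Bool) =>
      if p.2 && st.2.isNone then (st.1, some p.1)
      else if !p.2 && st.2.isSome then (st.1 ++ [(st.2.getD 0, p.1 - 1)], none)
      else st)
    ([], none)
  match st.2 with
  | some s => st.1 ++ [(s, (bool_list.length : Int) - 1)]   -- handle last segment
  | none => st.1

-- ===== PORT B =====
-- groupby(bool_list, key=bool): consume one maximal run of equal booleans per step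
def find_contiguous_segments_py_alt_go (l : List Bool) (idx : Int) : List (Int × Int) :=
  match l with
  | [] => []
  | b :: rest =>
    let length : Int := 1 + (rest.takeWhile (· == b)).length
    let tail := rest.dropWhile (· == b)
    (if b then [(idx, idx + length - 1)] else []) ++ find_contiguous_segments_py_alt_go tail (idx + length)
termination_by l.length
decreasing_by
  simpa using Nat.lt_succ_of_le (rest.dropWhile_sublist (p := (· == b))).length_le

def find_contiguous_segments_py_alt (bool_list : List Bool) : List (Int × Int) :=
  find_contiguous_segments_py_alt_go bool_list 0

-- ===== PRECONDITION & SPEC =====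
def Spec_find_contiguous_segments_py (bool_list : List Bool) (out : List (Int × Int)) : Prop := out = find_contiguous_segments_py_alt bool_list
instance (bool_list : List Bool) (out : List (Int × Int)) : Decidable (Spec_find_contiguous_segments_py bool_list out) := by unfold Spec_find_contiguous_segments_py; infer_instance

-- ===== CLAIM (what is proved, stated in full; the proofs are below) =====
def Claim_equal_find_contiguous_segments_py : Prop := ∀ (bool_list : List Bool), Dom_find_contiguous_segments_py bool_list → Spec_find_contiguous_segments_py bool_list (find_contiguous_segments_py bool_list)

-- ===== LEMMAS AND PROOFS =====

-- abbreviations for the proofs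
def pvStepA (st : List (Int × Int) × Option Int) (p : Int × Bool) : List (Int × Int) × Option Int :=
  if p.2 && st.2.isNone then (st.1, some p.1)
  else if !p.2 && st.2.isSome then (st.1 ++ [(st.2.getD 0, p.1 - 1)], none)
  else st

def pvFin (st : List (Int × Int) × Option Int) (endIdx : Int) : List (Int × Int) :=
  match st.2 with
  | some s => st.1 ++ [(s, endIdx - 1)]
  | none => st.1

lemma pvAltGo_nil (i : Int) : find_contiguous_segments_py_alt_go [] i = [] := by
  rw [find_contiguous_segments_py_alt_go.eq_def]

lemma pvAltGo_true (rest : List Bool) (i : Int) :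
    find_contiguous_segments_py_alt_go (true :: rest) i
      = (i, i + (1 + ((rest.takeWhile id).length : Int)) - 1)
          :: find_contiguous_segments_py_alt_go (rest.dropWhile id) (i + (1 + ((rest.takeWhile id).length : Int))) := by
  rw [find_contiguous_segments_py_alt_go.eq_def]
  simp
  exact ⟨rfl, rfl⟩

lemma pvAltGo_false (rest : List Bool) (i : Int) :
    find_contiguous_segments_py_alt_go (false :: rest) i
      = find_contiguous_segments_py_alt_go rest (i + 1) := by
  match rest with
  | [] =>
    rw [find_contiguous_segments_py_alt_go.eq_def]
    simp [pvAltGo_nil]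
  | true :: rest2 =>
    rw [find_contiguous_segments_py_alt_go.eq_def]
    simp [List.takeWhile, List.dropWhile]
  | false :: rest2 =>
    conv_lhs => rw [find_contiguous_segments_py_alt_go.eq_def]
    conv_rhs => rw [find_contiguous_segments_py_alt_go.eq_def]
    simp [List.takeWhile, List.dropWhile]
    congr 1
    ring

-- main invariant: closed-state and open-state characterisations of A's fold, simultaneously
lemma pvLoop_inv (bs : List Bool) :
    (∀ (segs : List (Int × Int)) (i : Int),
        pvFin ((PySem.List.enumerate bs i).foldl pvStepA (segs, none)) (i + bs.length)
          = segs ++ find_contiguous_segments_py_alt_go bs i)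
    ∧ (∀ (segs : List (Int × Int)) (i s : Int),
        pvFin ((PySem.List.enumerate bs i).foldl pvStepA (segs, some s)) (i + bs.length)
          = segs ++ [(s, i + ((bs.takeWhile id).length : Int) - 1)]
              ++ find_contiguous_segments_py_alt_go (bs.dropWhile id) (i + ((bs.takeWhile id).length : Int))) := by
  induction bs with
  | nil =>
    refine ⟨fun segs i => ?_, fun segs i s => ?_⟩ <;>
      simp [PySem.List.enumerate, pvFin, pvAltGo_nil]
  | cons b rest ih =>
    obtain ⟨ihc, iho⟩ := ih
    constructor
    · intro segs i
      cases b with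
      | true =>
        rw [PySem.List.enumerate_cons, List.foldl_cons,
          show pvStepA (segs, none) (i, true) = (segs, some i) from rfl,
          show (i + (((true :: rest).length : Nat) : Int)) = (i + 1) + (rest.length : Int) by
            simp [List.length_cons]; ring,
          iho segs (i + 1) i, pvAltGo_true]
        simp only [List.append_assoc, List.singleton_append, add_assoc]
      | false =>
        rw [PySem.List.enumerate_cons, List.foldl_cons,
          show pvStepA (segs, none) (i, false) = (segs, none) from rfl,
          show (i + (((false :: rest).length : Nat) : Int)) = (i + 1) + (rest.length : Int) by
            simp [List.length_cons]; ring,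
          ihc segs (i + 1), pvAltGo_false]
    · intro segs i s
      cases b with
      | true =>
        rw [PySem.List.enumerate_cons, List.foldl_cons,
          show pvStepA (segs, some s) (i, true) = (segs, some s) from rfl,
          show (i + (((true :: rest).length : Nat) : Int)) = (i + 1) + (rest.length : Int) by
            simp [List.length_cons]; ring,
          iho segs (i + 1) s]
        simp only [List.takeWhile, List.dropWhile, id, List.length_cons, List.append_assoc,
          List.singleton_append]
        push_cast
        ring_nf
      | false =>
        rw [PySem.List.enumerate_cons, List.foldl_cons,
          show pvStepA (segs, some s) (i, false) = (segs ++ [(s, i - 1)], none) from rfl,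
          show (i + (((false :: rest).length : Nat) : Int)) = (i + 1) + (rest.length : Int) by
            simp [List.length_cons]; ring,
          ihc (segs ++ [(s, i - 1)]) (i + 1)]
        simp only [List.takeWhile, List.dropWhile, id]
        rw [pvAltGo_false]
        simp

-- ===== VERDICT (by name: the statement is the Claim_ definition above) =====
theorem find_contiguous_segments_py_spec : Claim_equal_find_contiguous_segments_py := by
  intro bs _
  unfold Spec_find_contiguous_segments_py find_contiguous_segments_py find_contiguous_segments_py_alt
  have h := (pvLoop_inv bs).1 [] 0
  rw [zero_add] at h
  exact h
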